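-- pv_equiv track=rewrite | github.com/xperroni/TOTVS-Code-Challenge-2016-10 | challenge.py | accumulate_weekly
-- ===== SOURCE A (Python) =====
-- def accumulate_weekly(X, Y):
--     y_weekly = 0
--     X_weekly = []
--     Y_weekly = []
--     for (x, y) in zip(X, Y):
--         y_weekly += y
--         if x % 7 == 0:
--             X_weekly.append(x // 7)
--             Y_weekly.append(y_weekly)
--             y_weekly = 0
--
--     return (X_weekly, Y_weekly)
-- ===== SOURCE B (Python) =====
-- def accumulate_weekly(X, Y):
--     # Phase 1: one pass recording, at every week boundary (x % 7 == 0),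
--     # the boundary day x together with the running prefix total of Y.
--     total = 0
--     marks = []
--     for (x, y) in zip(X, Y):
--         total += y
--         if x % 7 == 0:
--             marks.append((x, total))
--     # Phase 2: derive both outputs from the marks; weekly sums are
--     # differences of consecutive prefix totals.
--     X_weekly = [x // 7 for (x, _) in marks]
--     Y_weekly = []
--     prev = 0
--     for (_, t) in marks:
--         Y_weekly.append(t - prev)
--         prev = t
--     return (X_weekly, Y_weekly)
-- ===== Notes on version B (the rewrite author's own statement) =====
-- stated objective: alternative
-- what changed: A sums into a single accumulator that it resets at each week boundary, appending to both outputs inline; B makes one pass recording boundary marks with running prefix totals, then derives X_weekly by a map and Y_weekly as differences of consecutive prefix totals in a second pass.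
import Mathlib
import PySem

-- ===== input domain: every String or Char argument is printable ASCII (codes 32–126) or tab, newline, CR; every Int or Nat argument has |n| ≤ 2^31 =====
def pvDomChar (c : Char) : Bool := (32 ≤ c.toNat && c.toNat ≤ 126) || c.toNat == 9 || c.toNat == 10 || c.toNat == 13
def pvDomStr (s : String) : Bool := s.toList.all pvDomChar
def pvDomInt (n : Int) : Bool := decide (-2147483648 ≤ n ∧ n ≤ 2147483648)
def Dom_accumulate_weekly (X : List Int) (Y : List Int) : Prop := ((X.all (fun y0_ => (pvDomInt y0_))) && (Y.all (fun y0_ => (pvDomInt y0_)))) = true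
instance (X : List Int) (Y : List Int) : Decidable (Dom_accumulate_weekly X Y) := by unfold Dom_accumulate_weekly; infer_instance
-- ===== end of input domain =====

-- B replaces A's reset-at-boundary accumulator with a two-phase pass (boundary marks with
-- running prefix totals, then outputs derived as a map and a difference scan); objective: alternative.

-- ===== PORT A =====
-- loop body of A's single for-loop, state = (y_weekly, X_weekly, Y_weekly)
def stepA (st : Int × List Int × List Int) (p : Int × Int) : Int × List Int × List Int :=
  let yw := st.1 + p.2
  if PySem.Int.mod p.1 7 = 0 then
    (0, st.2.1 ++ [PySem.Int.floordiv p.1 7], st.2.2 ++ [yw])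
  else (yw, st.2.1, st.2.2)

def accumulate_weekly (X : List Int) (Y : List Int) : List Int × List Int :=
  let r := (List.zip X Y).foldl stepA (0, [], [])
  (r.2.1, r.2.2)

-- ===== PORT B =====
-- phase-1 loop body of B, state = (total, marks)
def stepMark (st : Int × List (Int × Int)) (p : Int × Int) : Int × List (Int × Int) :=
  let total := st.1 + p.2
  if PySem.Int.mod p.1 7 = 0 then (total, st.2 ++ [(p.1, total)]) else (total, st.2)

-- phase-2 loop body of B, state = (prev, Y_weekly)
def stepDiff (st : Int × List Int) (q : Int × Int) : Int × List Int :=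
  (q.2, st.2 ++ [q.2 - st.1])

def accumulate_weekly_alt (X : List Int) (Y : List Int) : List Int × List Int :=
  let marks := ((List.zip X Y).foldl stepMark (0, [])).2
  let Xw := marks.map (fun q => PySem.Int.floordiv q.1 7)
  let Yw := (marks.foldl stepDiff (0, [])).2
  (Xw, Yw)

-- ===== PRECONDITION & SPEC =====
def Spec_accumulate_weekly (X : List Int) (Y : List Int) (out : List Int × List Int) : Prop := out = accumulate_weekly_alt X Y
instance (X : List Int) (Y : List Int) (out : List Int × List Int) : Decidable (Spec_accumulate_weekly X Y out) := by unfold Spec_accumulate_weekly; infer_instance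

-- ===== CLAIM (what is proved, stated in full; the proofs are below) =====
def Claim_equal_accumulate_weekly : Prop := ∀ (X : List Int) (Y : List Int), Dom_accumulate_weekly X Y → Spec_accumulate_weekly X Y (accumulate_weekly X Y)

-- ===== LEMMAS AND PROOFS =====

-- functional form of B's phase-1: the marks produced from prefix total t
def mMarks (t : Int) : List (Int × Int) → List (Int × Int)
  | [] => []
  | p :: r =>
    if PySem.Int.mod p.1 7 = 0 then (p.1, t + p.2) :: mMarks (t + p.2) r
    else mMarks (t + p.2) r

-- functional form of B's phase-2: consecutive differences starting from prev
def dDiffs (prev : Int) : List (Int × Int) → List Int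
  | [] => []
  | q :: r => (q.2 - prev) :: dDiffs q.2 r

lemma marksFold (ps : List (Int × Int)) : ∀ (t : Int) (acc : List (Int × Int)),
    (ps.foldl stepMark (t, acc)).2 = acc ++ mMarks t ps := by
  induction ps with
  | nil => simp [mMarks]
  | cons p r ih =>
    intro t acc
    simp only [List.foldl, stepMark, mMarks]
    split_ifs with h <;> simp [ih]

lemma diffsFold (l : List (Int × Int)) : ∀ (prev : Int) (acc : List Int),
    (l.foldl stepDiff (prev, acc)).2 = acc ++ dDiffs prev l := by
  induction l with
  | nil => simp [dDiffs]
  | cons q r ih =>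
    intro prev acc
    simp [List.foldl, stepDiff, dDiffs, ih]

lemma mainA (ps : List (Int × Int)) : ∀ (c t prev : Int) (xs ys : List Int),
    c = t - prev →
    (ps.foldl stepA (c, xs, ys)).2 =
      (xs ++ (mMarks t ps).map (fun q => PySem.Int.floordiv q.1 7),
       ys ++ dDiffs prev (mMarks t ps)) := by
  induction ps with
  | nil => intro c t prev xs ys hc; simp [mMarks, dDiffs]
  | cons p r ih =>
    intro c t prev xs ys hc
    subst hc
    simp only [List.foldl, stepA, mMarks]
    split_ifs with h
    · rw [ih 0 (t + p.2) (t + p.2) _ _ (by ring)]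
      have harith : t - prev + p.2 = t + p.2 - prev := by ring
      simp [dDiffs, harith]
    · rw [ih (t - prev + p.2) (t + p.2) prev _ _ (by ring)]

-- ===== VERDICT (by name: the statement is the Claim_ definition above) =====
theorem accumulate_weekly_spec : Claim_equal_accumulate_weekly := by
  intro X Y _
  show accumulate_weekly X Y = accumulate_weekly_alt X Y
  simp only [accumulate_weekly, accumulate_weekly_alt, marksFold, diffsFold]
  have h := mainA (List.zip X Y) 0 0 0 [] [] (by ring)
  rw [h]; simp
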